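-- pv_equiv track=rewrite | github.com/joserapa/TenTorch | tentorch/utils.py | enum_repeated_names
-- ===== SOURCE A (Python) =====
-- from typing import List, Sequence, Text
--
-- def erase_enum(name: Text) -> Text:
--     """
--     Given a name, returns the same name without any
--     enumeration suffix with format `_{digit}`.
--     """
--     name_list = name.split('_')
--     i = len(name_list) - 1
--     while i >= 0:
--         if name_list[i].isdigit():
--             i -= 1
--         else:
--             break
--     new_name = '_'.join(name_list[:i+1])
--     return new_name
--
-- def enum_repeated_names(names_list: List[Text]) -> List[Text]:
--     """
--     Given a list of (axes or nodes) names, returns the same list but adding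
--     an enumeration for the names that appear more than once in the list.
--     """
--     counts = dict()
--     aux_list = []
--     for name in names_list:
--         name = erase_enum(name)
--         aux_list.append(name)
--         if name in counts:
--             counts[name] += 1
--         else:
--             counts[name] = 0
--
--     for name in counts:
--         if counts[name] == 0:
--             counts[name] = -1
--
--     aux_list.reverse()
--     for i, name in enumerate(aux_list):
--         if counts[name] >= 0:
--             aux_list[i] = f'{name}_{counts[name]}'
--             counts[name] -= 1
--     aux_list.reverse()
--     return aux_list
-- ===== SOURCE B (Python) =====
-- from typing import List, Text
--
--
-- def erase_enum(name: Text) -> Text: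
--     """
--     Given a name, returns the same name without any
--     enumeration suffix with format `_{digit}`.
--     """
--     name_list = name.split('_')
--     i = len(name_list) - 1
--     while i >= 0:
--         if name_list[i].isdigit():
--             i -= 1
--         else:
--             break
--     new_name = '_'.join(name_list[:i+1])
--     return new_name
--
--
-- def enum_repeated_names(names_list: List[Text]) -> List[Text]:
--     """
--     Given a list of (axes or nodes) names, returns the same list but adding
--     an enumeration for the names that appear more than once in the list.
--     """
--     stripped = [erase_enum(name) for name in names_list]
--     total = {}
--     for name in stripped:
--         total[name] = total.get(name, 0) + 1
--     seen = {}
--     result = []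
--     for name in stripped:
--         k = seen.get(name, 0)
--         seen[name] = k + 1
--         result.append(f'{name}_{k}' if total[name] > 1 else name)
--     return result
-- ===== Notes on version B (the rewrite author's own statement) =====
-- stated objective: alternative
-- what changed: Replaces A's sentinel dict (-1 for singletons), double list reversal and backwards count-down mutation pass by a forward pass that numbers each duplicate with the count of its earlier occurrences, using a precomputed totals dict.
import Mathlib
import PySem

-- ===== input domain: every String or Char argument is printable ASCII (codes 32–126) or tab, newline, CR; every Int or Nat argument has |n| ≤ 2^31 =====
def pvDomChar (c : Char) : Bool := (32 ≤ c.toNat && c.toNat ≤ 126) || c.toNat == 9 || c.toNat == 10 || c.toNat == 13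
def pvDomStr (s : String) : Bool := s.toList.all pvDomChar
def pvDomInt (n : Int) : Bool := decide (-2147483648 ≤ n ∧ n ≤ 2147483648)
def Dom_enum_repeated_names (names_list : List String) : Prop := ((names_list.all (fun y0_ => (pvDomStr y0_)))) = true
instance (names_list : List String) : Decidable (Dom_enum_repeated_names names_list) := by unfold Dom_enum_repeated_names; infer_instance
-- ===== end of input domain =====

-- B replaces A's sentinel dict + double reversal + backwards count-down mutation pass by a
-- forward count-up pass over the stripped names with a precomputed totals dict (objective: alternative).

-- ===== PORT A =====
-- shared helper (identical in Source A and Source B): erase_enum's while-loop, fuel = name_list.length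
def erase_enum_loop (nl : List String) (i : Int) : Nat → Int
  | 0 => i
  | f + 1 =>
    if 0 ≤ i then
      match PySem.List.pyGet? nl i with
      | some s => if PySem.Str.strIsdigit s then erase_enum_loop nl (i - 1) f else i
      | none => i          -- unreachable: 0 ≤ i < nl.length throughout the loop
    else i

def erase_enum (name : String) : String :=
  let name_list := (PySem.Str.split? name "_").getD []   -- sep "_" ≠ "", so split? is never none
  let i := erase_enum_loop name_list ((name_list.length : Int) - 1) name_list.length
  PySem.Str.join "_" (PySem.List.slice name_list none (some (i + 1)))

def enum_repeated_names (names_list : List String) : List String :=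
  -- first loop: build counts and aux_list together
  let st := names_list.foldl
    (fun (st : PySem.Dict String Int × List String) name =>
      ((let n := erase_enum name;
        if st.1.contains n then st.1.modify n 0 (· + 1) else st.1.insert n 0),
       st.2 ++ [erase_enum name]))
    (PySem.Dict.empty, [])
  let counts := st.1
  let aux_list := st.2
  -- second loop: counts[name] = -1 where the count stayed 0
  let counts := counts.keys.foldl
    (fun (d : PySem.Dict String Int) name =>
      if d.getD name 0 = 0 then d.insert name (-1) else d) counts
  -- aux_list.reverse(); third loop mutates aux_list[i] in place; modelled by rebuilding in order
  let st2 := aux_list.reverse.foldl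
    (fun (st : PySem.Dict String Int × List String) name =>
      let v := st.1.getD name 0    -- counts[name]; name is always a key here
      if 0 ≤ v then (st.1.insert name (v - 1), st.2 ++ [name ++ "_" ++ PySem.Int.toStr v])
      else (st.1, st.2 ++ [name]))
    (counts, [])
  st2.2.reverse

-- ===== PORT B =====
def enum_repeated_names_alt (names_list : List String) : List String :=
  let stripped := names_list.map erase_enum
  let total := stripped.foldl
    (fun (d : PySem.Dict String Int) name => d.insert name (d.getD name 0 + 1)) PySem.Dict.empty
  (stripped.foldl
    (fun (st : PySem.Dict String Int × List String) name =>
      let k := st.1.getD name 0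
      (st.1.insert name (k + 1),
       st.2 ++ [if 1 < total.getD name 0 then name ++ "_" ++ PySem.Int.toStr k else name]))
    (PySem.Dict.empty, [])).2

-- ===== PRECONDITION & SPEC =====
def Spec_enum_repeated_names (names_list : List String) (out : List String) : Prop := out = enum_repeated_names_alt names_list
instance (names_list : List String) (out : List String) : Decidable (Spec_enum_repeated_names names_list out) := by unfold Spec_enum_repeated_names; infer_instance

-- ===== CLAIM (what is proved, stated in full; the proofs are below) =====
def Claim_equal_enum_repeated_names : Prop := ∀ (names_list : List String), Dom_enum_repeated_names names_list → Spec_enum_repeated_names names_list (enum_repeated_names names_list)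

-- ===== LEMMAS AND PROOFS =====

-- the suffixed name f'{name}_{v}'
def pvTag (s : String) (v : Int) : String := s ++ "_" ++ PySem.Int.toStr v

-- pvH0 L s = the value A's dict holds for s after the first two loops (for s ∈ L)
def pvH0 (L : List String) (s : String) : Int :=
  if List.count s L = 1 then -1 else (List.count s L : Int) - 1

-- A's first loop, counts component
def pvBuild (l : List String) (d : PySem.Dict String Int) : PySem.Dict String Int :=
  l.foldl (fun d n => if d.contains n then d.modify n 0 (· + 1) else d.insert n 0) d

-- A's second loop
def pvFix (ks : List String) (d : PySem.Dict String Int) : PySem.Dict String Int :=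
  ks.foldl (fun d n => if d.getD n 0 = 0 then d.insert n (-1) else d) d

-- A's third-loop body (zeta-reduced form of the port's lambda)
def pvStep3 (st : PySem.Dict String Int × List String) (name : String) :
    PySem.Dict String Int × List String :=
  if 0 ≤ st.1.getD name 0 then
    (st.1.insert name (st.1.getD name 0 - 1), st.2 ++ [name ++ "_" ++ PySem.Int.toStr (st.1.getD name 0)])
  else (st.1, st.2 ++ [name])

-- A's third loop, as structural recursion on the (reversed) list, dict state
def pvPassRec (r : List String) (d : PySem.Dict String Int) : List String :=
  match r with
  | [] => []
  | s :: t =>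
    if 0 ≤ d.getD s 0 then pvTag s (d.getD s 0) :: pvPassRec t (d.insert s (d.getD s 0 - 1))
    else s :: pvPassRec t d

-- the same pass with the dict abstracted to a function
def pvPassF (r : List String) (g : String → Int) : List String :=
  match r with
  | [] => []
  | s :: t =>
    if 0 ≤ g s then pvTag s (g s) :: pvPassF t (fun s' => if s' = s then g s' - 1 else g s')
    else s :: pvPassF t g

-- unconditional-decrement version
def pvQ (r : List String) (h : String → Int) : List String :=
  match r with
  | [] => []
  | s :: t =>
    (if 0 ≤ h s then pvTag s (h s) else s) :: pvQ t (fun s' => if s' = s then h s' - 1 else h s')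

-- forward characterization: the occurrence followed by suffix t gets value h s - t.count s
def pvM (l : List String) (h : String → Int) : List String :=
  match l with
  | [] => []
  | s :: t =>
    (if 0 ≤ h s - List.count s t then pvTag s (h s - List.count s t) else s) :: pvM t h

theorem pvBuild_getD (l : List String) (d : PySem.Dict String Int) (s : String) :
    (pvBuild l d).getD s 0 =
      if d.contains s then d.getD s 0 + List.count s l
      else if s ∈ l then (List.count s l : Int) - 1 else 0 := by
  induction l generalizing d with
  | nil =>
    by_cases hc : d.contains s
    · simp [pvBuild, hc]
    · simp [pvBuild, hc, PySem.Dict.getD_of_not_contains d 0 (by simpa using hc)]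
  | cons x t ih =>
    simp only [pvBuild, List.foldl_cons] at ih ⊢
    by_cases hc : d.contains x
    · rw [if_pos hc, ih]
      by_cases hsx : s = x
      · subst hsx
        rw [if_pos (by rw [PySem.Dict.contains_modify]; simp), if_pos hc,
            PySem.Dict.getD_modify_self, List.count_cons_self]
        push_cast; ring
      · rw [PySem.Dict.getD_modify_of_ne d 0 _ hsx,
            show (d.modify x 0 (· + 1)).contains s = d.contains s by
              rw [PySem.Dict.contains_modify]; simp [hsx]]
        have hxs : ¬ x = s := fun h => hsx h.symm
        simp [List.mem_cons, hsx, hxs]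
    · rw [if_neg hc, ih]
      by_cases hsx : s = x
      · subst hsx
        rw [if_pos (PySem.Dict.contains_insert_self _ _ _), PySem.Dict.getD_insert_self,
            if_neg hc, List.count_cons_self]
        simp only [List.mem_cons, true_or, if_pos]
        push_cast; ring
      · rw [show (d.insert x 0).contains s = d.contains s by
              rw [PySem.Dict.contains_insert]; simp [hsx],
            PySem.Dict.getD_insert_of_ne d _ _ hsx]
        have hxs : ¬ x = s := fun h => hsx h.symm
        simp [List.mem_cons, hsx, hxs]

theorem pvFix_getD (ks : List String) (d : PySem.Dict String Int) (s : String) :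
    (pvFix ks d).getD s 0 =
      if s ∈ ks then (if d.getD s 0 = 0 then -1 else d.getD s 0) else d.getD s 0 := by
  induction ks generalizing d with
  | nil => simp [pvFix]
  | cons k t ih =>
    simp only [pvFix, List.foldl_cons] at ih ⊢
    rw [ih]
    have hstep : (if d.getD k 0 = 0 then d.insert k (-1) else d).getD s 0 =
        if s = k then (if d.getD s 0 = 0 then -1 else d.getD s 0) else d.getD s 0 := by
      by_cases hsk : s = k
      · subst hsk
        by_cases h0 : d.getD s 0 = 0
        · rw [if_pos h0, if_pos rfl, if_pos h0, PySem.Dict.getD_insert_self]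
        · rw [if_neg h0, if_pos rfl, if_neg h0]
      · by_cases h0 : d.getD k 0 = 0
        · rw [if_pos h0, if_neg hsk, PySem.Dict.getD_insert_of_ne d _ _ hsk]
        · rw [if_neg h0, if_neg hsk]
    rw [hstep]
    by_cases hsk : s = k
    · subst hsk
      by_cases h0 : d.getD s 0 = 0 <;> by_cases hmem : s ∈ t <;>
        simp [h0, hmem, List.mem_cons]
    · by_cases hmem : s ∈ t <;> simp [hsk, hmem, List.mem_cons]

theorem pvBuild_mem_keys (l : List String) (d : PySem.Dict String Int) (s : String) :
    s ∈ (pvBuild l d).keys ↔ s ∈ l ∨ s ∈ d.keys := by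
  induction l generalizing d with
  | nil => simp [pvBuild]
  | cons x t ih =>
    simp only [pvBuild, List.foldl_cons] at ih ⊢
    by_cases hc : d.contains x
    · rw [if_pos hc, ih]
      have hx : x ∈ d.keys := (PySem.Dict.contains_iff_mem_keys _ _).mp hc
      have hk : s ∈ (d.modify x 0 (· + 1)).keys ↔ s = x ∨ s ∈ d.keys := by
        rw [PySem.Dict.keys_modify, PySem.Dict.mem_keys_insert]
      rw [hk, List.mem_cons]
      constructor
      · rintro (h | h | h)
        · exact Or.inl (Or.inr h)
        · exact Or.inl (Or.inl h)
        · exact Or.inr h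
      · rintro (h | h)
        · rcases h with h | h
          · exact Or.inr (Or.inl h)
          · exact Or.inl h
        · exact Or.inr (Or.inr h)
    · rw [if_neg hc, ih, PySem.Dict.mem_keys_insert, List.mem_cons]
      tauto

theorem pvPass_foldl (r : List String) (d : PySem.Dict String Int) (acc : List String) :
    (r.foldl pvStep3 (d, acc)).2 = acc ++ pvPassRec r d := by
  induction r generalizing d acc with
  | nil => simp [pvPassRec]
  | cons s t ih =>
    simp only [List.foldl_cons, pvPassRec, pvStep3]
    by_cases h : 0 ≤ d.getD s 0
    · rw [if_pos h, if_pos h, ih]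
      simp [pvTag]
    · rw [if_neg h, if_neg h, ih]
      simp

theorem pvPassRec_eq_passF (r : List String) (d : PySem.Dict String Int) :
    pvPassRec r d = pvPassF r (fun s => d.getD s 0) := by
  induction r generalizing d with
  | nil => rfl
  | cons s t ih =>
    simp only [pvPassRec, pvPassF]
    by_cases h : 0 ≤ d.getD s 0
    · rw [if_pos h, if_pos h, ih]
      have hfun : (fun s' => (d.insert s (d.getD s 0 - 1)).getD s' 0) =
          fun s' => if s' = s then d.getD s' 0 - 1 else d.getD s' 0 := by
        funext s'
        by_cases hs : s' = s
        · subst hs; simp [PySem.Dict.getD_insert_self]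
        · simp [hs, PySem.Dict.getD_insert_of_ne d _ _ hs]
      rw [hfun]
    · rw [if_neg h, if_neg h, ih]

theorem pvPassF_eq_Q (r : List String) (g h : String → Int)
    (hyp : ∀ s ∈ r, (0 ≤ h s → g s = h s) ∧ (h s < 0 → g s < 0)) :
    pvPassF r g = pvQ r h := by
  induction r generalizing g h with
  | nil => rfl
  | cons s t ih =>
    obtain ⟨h1, h2⟩ := hyp s (List.mem_cons_self ..)
    simp only [pvPassF, pvQ]
    by_cases hh : 0 ≤ h s
    · have hg : g s = h s := h1 hh
      rw [if_pos hh, if_pos (by omega), hg]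
      congr 1
      apply ih
      intro s' hs'
      obtain ⟨h1', h2'⟩ := hyp s' (List.mem_cons_of_mem _ hs')
      by_cases hss : s' = s
      · subst hss
        rw [if_pos rfl, if_pos rfl]
        exact ⟨fun _ => by omega, fun _ => by omega⟩
      · rw [if_neg hss, if_neg hss]
        exact ⟨h1', h2'⟩
    · have hgneg : g s < 0 := h2 (by omega)
      rw [if_neg (by omega), if_neg (by omega)]
      congr 1
      apply ih
      intro s' hs'
      obtain ⟨h1', h2'⟩ := hyp s' (List.mem_cons_of_mem _ hs')
      by_cases hss : s' = s
      · subst hss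
        rw [if_pos rfl]
        exact ⟨fun hp => by omega, fun hn => hgneg⟩
      · rw [if_neg hss]
        exact ⟨h1', h2'⟩

theorem pvM_append (t : List String) (x : String) (h : String → Int) :
    pvM (t ++ [x]) h =
      pvM t (fun s' => if s' = x then h s' - 1 else h s') ++ [if 0 ≤ h x then pvTag x (h x) else x] := by
  induction t with
  | nil => simp [pvM]
  | cons s t ih =>
    simp only [List.cons_append, pvM, ih]
    congr 1
    have hEq : h s - (List.count s (t ++ [x]) : Int) =
        (if s = x then h s - 1 else h s) - (List.count s t : Int) := by
      by_cases hsx : s = x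
      · subst hsx
        rw [if_pos rfl, show List.count s (t ++ [s]) = List.count s t + 1 by
              simp [List.count_append]]
        push_cast; ring
      · rw [if_neg hsx, show List.count s (t ++ [x]) = List.count s t by
              simp [List.count_append, List.count_eq_zero.mpr (show s ∉ [x] by simp [hsx])]]
    rw [hEq]

theorem pvQ_reverse (l : List String) (h : String → Int) :
    (pvQ l.reverse h).reverse = pvM l h := by
  induction l using List.reverseRecOn generalizing h with
  | nil => rfl
  | append_singleton t x ih =>
    have hr : (t ++ [x]).reverse = x :: t.reverse := by simp
    rw [hr]
    simp only [pvQ, List.reverse_cons]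
    rw [ih, pvM_append]

-- B's second loop with the dicts abstracted to functions: g = totals, c = occurrences so far
def pvFwdF (t : List String) (g c : String → Int) : List String :=
  match t with
  | [] => []
  | s :: t' =>
    (if 1 < g s then pvTag s (c s) else s) :: pvFwdF t' g (fun s' => if s' = s then c s' + 1 else c s')

theorem pvFwd_foldl (total : PySem.Dict String Int) (t : List String)
    (seen : PySem.Dict String Int) (acc : List String) :
    (t.foldl
      (fun (st : PySem.Dict String Int × List String) name =>
        (st.1.insert name (st.1.getD name 0 + 1),
         st.2 ++ [if 1 < total.getD name 0 then name ++ "_" ++ PySem.Int.toStr (st.1.getD name 0) else name]))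
      (seen, acc)).2 =
    acc ++ pvFwdF t (fun s => total.getD s 0) (fun s => seen.getD s 0) := by
  induction t generalizing seen acc with
  | nil => simp [pvFwdF]
  | cons s t' ih =>
    simp only [List.foldl_cons, pvFwdF]
    rw [ih]
    have hfun : (fun s' => (seen.insert s (seen.getD s 0 + 1)).getD s' 0) =
        fun s' => if s' = s then seen.getD s' 0 + 1 else seen.getD s' 0 := by
      funext s'
      by_cases hs : s' = s
      · subst hs; simp [PySem.Dict.getD_insert_self]
      · simp [hs, PySem.Dict.getD_insert_of_ne seen _ _ hs]
    rw [hfun]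
    simp [pvTag]

theorem pvFwdF_eq_M (L : List String) (t pre : List String) (hL : L = pre ++ t) :
    pvFwdF t (fun s => (List.count s L : Int)) (fun s => (List.count s pre : Int)) = pvM t (pvH0 L) := by
  induction t generalizing pre with
  | nil => simp [pvFwdF, pvM]
  | cons s t' ih =>
    simp only [pvFwdF, pvM]
    congr 1
    · -- head element
      have hcnt : List.count s L = List.count s pre + 1 + List.count s t' := by
        rw [hL]; simp [List.count_append]; ring
      by_cases h1 : List.count s L = 1
      · have ht' : List.count s t' = 0 := by omega
        rw [if_neg (by omega), if_neg (by simp [pvH0, h1, ht'])]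
      · have hgt : (1 : Int) < List.count s L := by
          have hm : s ∈ L := by rw [hL]; simp
          have := List.count_pos_iff.mpr hm
          omega
        rw [if_pos hgt, if_pos (by simp only [pvH0, if_neg h1]; omega)]
        have hv : ((List.count s pre : Nat) : Int) = pvH0 L s - List.count s t' := by
          simp only [pvH0, if_neg h1]; omega
        rw [hv]
    · -- tail
      have h := ih (pre ++ [s]) (by rw [hL]; simp)
      have hfun : (fun s' => (List.count s' (pre ++ [s]) : Int)) =
          fun s' => if s' = s then (List.count s' pre : Int) + 1 else (List.count s' pre : Int) := by
        funext s'
        by_cases hs : s' = s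
        · subst hs; simp [List.count_append]
        · simp [List.count_append, hs,
                List.count_eq_zero.mpr (show s' ∉ [s] by simp [hs])]
      rw [hfun] at h
      exact h

theorem pvAux_build (names : List String) (d : PySem.Dict String Int) (acc : List String) :
    names.foldl
      (fun (st : PySem.Dict String Int × List String) name =>
        ((if st.1.contains (erase_enum name) then st.1.modify (erase_enum name) 0 (· + 1)
          else st.1.insert (erase_enum name) 0),
         st.2 ++ [erase_enum name])) (d, acc) =
    (pvBuild (names.map erase_enum) d, acc ++ names.map erase_enum) := by
  induction names generalizing d acc with
  | nil => simp [pvBuild]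
  | cons x t ih =>
    simp only [List.foldl_cons, List.map_cons, pvBuild, List.foldl_cons] at ih ⊢
    rw [ih]
    simp

-- ===== VERDICT (by name: the statement is the Claim_ definition above) =====
theorem enum_repeated_names_spec : Claim_equal_enum_repeated_names := by
  intro names_list _
  unfold Spec_enum_repeated_names
  set L := names_list.map erase_enum with hLdef
  set d2 := pvFix (pvBuild L PySem.Dict.empty).keys (pvBuild L PySem.Dict.empty) with hd2
  have e1 : enum_repeated_names names_list = (pvPassRec L.reverse d2).reverse := by
    unfold enum_repeated_names
    simp only []
    rw [pvAux_build]
    show (List.foldl pvStep3 (pvFix (pvBuild L PySem.Dict.empty).keys (pvBuild L PySem.Dict.empty), []) L.reverse).2.reverse = _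
    rw [pvPass_foldl, List.nil_append]
  have hgfin : ∀ s ∈ L, d2.getD s 0 = pvH0 L s := by
    intro s hs
    have hk : s ∈ (pvBuild L PySem.Dict.empty).keys := by
      rw [pvBuild_mem_keys]; exact Or.inl hs
    have hX : (pvBuild L PySem.Dict.empty).getD s 0 = (List.count s L : Int) - 1 := by
      rw [pvBuild_getD]
      rw [if_neg (by simp [PySem.Dict.contains_empty]), if_pos hs]
    have hpos : 0 < List.count s L := List.count_pos_iff.mpr hs
    rw [hd2, pvFix_getD, if_pos hk, hX]
    unfold pvH0
    by_cases h1 : List.count s L = 1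
    · rw [if_pos (by omega), if_pos h1]
    · rw [if_neg (by omega), if_neg h1]
  have e2 : pvPassRec L.reverse d2 = pvQ L.reverse (pvH0 L) := by
    rw [pvPassRec_eq_passF]
    apply pvPassF_eq_Q
    intro s hs
    rw [hgfin s (List.mem_reverse.mp hs)]
    exact ⟨fun _ => rfl, fun h => h⟩
  have e4 : enum_repeated_names_alt names_list = pvM L (pvH0 L) := by
    unfold enum_repeated_names_alt
    simp only []
    rw [pvFwd_foldl, List.nil_append]
    have htot : (fun s => (L.foldl
        (fun (d : PySem.Dict String Int) name => d.insert name (d.getD name 0 + 1))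
        PySem.Dict.empty).getD s 0) = fun s => (List.count s L : Int) := by
      funext s
      rw [PySem.Dict.getD_foldl_insert_add_one, PySem.Dict.getD_empty]
      simp
    have hseen : (fun s => (PySem.Dict.empty : PySem.Dict String Int).getD s 0) =
        fun s => (List.count s ([] : List String) : Int) := by
      funext s; simp [PySem.Dict.getD_empty]
    rw [htot, hseen, pvFwdF_eq_M L L [] (by simp)]
  rw [e1, e2, pvQ_reverse, e4]
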